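-- pv_equiv track=rewrite | github.com/posl/comment_recommendation | script/split_gen/1_time/zh/162_B/9.py | func
-- ===== SOURCE A (Python) =====
-- def func(n):
--     sum = 0
--     for i in range(1,n+1):
--         if i % 15 == 0:
--             sum += 0
--         elif i % 3 == 0:
--             sum += i
--         elif i % 5 == 0:
--             sum += i
--         else:
--             sum += i
--     return sum
-- ===== SOURCE B (Python) =====
-- def func(n):
--     if n <= 0:
--         return 0
--     k = n // 15
--     return n * (n + 1) // 2 - 15 * k * (k + 1) // 2
-- ===== Notes on version B (the rewrite author's own statement) =====
-- stated objective: faster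
-- what changed: Replaced the O(n) loop over range(1,n+1) by the closed form n(n+1)/2 - 15*k(k+1)/2 with k = n//15 (the loop sums 1..n skipping multiples of 15).
import Mathlib
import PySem

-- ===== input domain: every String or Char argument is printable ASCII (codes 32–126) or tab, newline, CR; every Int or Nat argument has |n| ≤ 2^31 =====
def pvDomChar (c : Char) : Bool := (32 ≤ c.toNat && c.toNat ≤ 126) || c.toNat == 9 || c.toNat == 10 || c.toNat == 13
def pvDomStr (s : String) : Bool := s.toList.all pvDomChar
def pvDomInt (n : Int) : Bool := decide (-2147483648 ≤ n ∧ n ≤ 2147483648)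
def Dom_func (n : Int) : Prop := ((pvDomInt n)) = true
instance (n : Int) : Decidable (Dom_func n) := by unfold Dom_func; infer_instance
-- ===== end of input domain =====

-- B replaces A's O(n) loop by the closed form n(n+1)/2 - 15*k(k+1)/2, k = n//15 (faster, asymptotic).

-- ===== PORT A =====
def func (n : Int) : Int :=
  (PySem.List.pyRange 1 (n+1) 1).foldl
    (fun sum i =>
      if PySem.Int.mod i 15 = 0 then sum + 0
      else if PySem.Int.mod i 3 = 0 then sum + i
      else if PySem.Int.mod i 5 = 0 then sum + i
      else sum + i) 0

-- ===== PORT B =====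
def func_alt (n : Int) : Int :=
  if n ≤ 0 then 0
  else
    let k := PySem.Int.floordiv n 15
    PySem.Int.floordiv (n * (n + 1)) 2 - PySem.Int.floordiv (15 * k * (k + 1)) 2

-- ===== PRECONDITION & SPEC =====
def Spec_func (n : Int) (out : Int) : Prop := out = func_alt n
instance (n : Int) (out : Int) : Decidable (Spec_func n out) := by unfold Spec_func; infer_instance

-- ===== CLAIM (what is proved, stated in full; the proofs are below) =====
def Claim_equal_func : Prop := ∀ (n : Int), Dom_func n → Spec_func n (func n)

-- ===== LEMMAS AND PROOFS =====

lemma func_succ (m : Nat) :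
    func ((m : Int) + 1) = func (m : Int) + (if ((m : Int) + 1) % 15 = 0 then 0 else (m : Int) + 1) := by
  unfold func
  rw [PySem.List.pyRange_one_succ_right (a := 1) (b := (m : Int) + 1) (by omega), List.foldl_append]
  simp only [List.foldl]
  rw [PySem.Int.mod_eq_emod_of_pos (a := (m : Int) + 1) (b := 15) (by norm_num)]
  split_ifs <;> ring

lemma func_nat2 (m : Nat) :
    2 * func (m : Int) =
      (m : Int) * ((m : Int) + 1) - 15 * ((m : Int) / 15) * (((m : Int) / 15) + 1) := by
  induction m with
  | zero => decide
  | succ m ih =>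
      push_cast
      rw [func_succ m, mul_add, ih]
      by_cases h : ((m : Int) + 1) % 15 = 0
      · rw [if_pos h]
        obtain ⟨q, hq1, hq2, hq3⟩ :
            ∃ q, (m : Int) = 15 * q + 14 ∧ (m : Int) / 15 = q ∧ ((m : Int) + 1) / 15 = q + 1 :=
          ⟨(m : Int) / 15, by omega, rfl, by omega⟩
        rw [hq2, hq3, hq1]; ring
      · rw [if_neg h]
        have hq : ((m : Int) + 1) / 15 = (m : Int) / 15 := by omega
        have hring : ((m : Int) + 1) * ((m : Int) + 1 + 1) = (m : Int) * ((m : Int) + 1) + 2 * ((m : Int) + 1) := by ring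
        rw [hq]
        omega

lemma even_helper (x : Int) : 2 ∣ 15 * x * (x + 1) := by
  obtain ⟨t, ht⟩ := Int.even_mul_succ_self x
  exact ⟨15 * t, by rw [mul_assoc, ht]; ring⟩

lemma func_nat (m : Nat) :
    func (m : Int) =
      (m : Int) * ((m : Int) + 1) / 2 - 15 * ((m : Int) / 15) * (((m : Int) / 15) + 1) / 2 := by
  have h2 := func_nat2 m
  have e1 : 2 ∣ (m : Int) * ((m : Int) + 1) := by
    obtain ⟨t, ht⟩ := Int.even_mul_succ_self (m : Int)
    exact ⟨t, by rw [ht]; ring⟩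
  have e2 := even_helper ((m : Int) / 15)
  omega

theorem func_spec : Claim_equal_func := by
  intro n _
  unfold Spec_func func_alt
  by_cases hn : n ≤ 0
  · simp only [hn, if_pos]
    unfold func
    rw [PySem.List.pyRange_one_eq_nil (by omega)]
    rfl
  · simp only [hn, if_false]
    have hn0 : (0:Int) ≤ n := by omega
    have hcast : ((n.toNat : Int)) = n := Int.toNat_of_nonneg hn0
    rw [PySem.Int.floordiv_eq_ediv_of_pos (by norm_num : (0:Int) < 15),
        PySem.Int.floordiv_eq_ediv_of_pos (by norm_num : (0:Int) < 2),
        PySem.Int.floordiv_eq_ediv_of_pos (by norm_num : (0:Int) < 2)]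
    rw [← hcast, func_nat n.toNat]
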